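-- pv_equiv track=rewrite | github.com/aduriseti/nemotron | reasoners/bit_manipulation_solver/bit_solver_v5_symbreak.py | _rotated_range
-- ===== SOURCE A (Python) =====
-- def _rotated_range(start: int, lo: int, hi: int):
--     if lo >= hi:
--         return
--     if lo <= start < hi:
--         for p in range(start, hi):
--             yield p
--         for p in range(lo, start):
--             yield p
--     else:
--         yield from range(lo, hi)
-- ===== SOURCE B (Python) =====
-- def _rotated_range(start: int, lo: int, hi: int):
--     n = hi - lo
--     if n <= 0:
--         return
--     offset = start - lo if lo <= start < hi else 0
--     for i in range(n):
--         yield lo + (offset + i) % n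
-- ===== Notes on version B (the rewrite author's own statement) =====
-- stated objective: alternative
-- what changed: Replaces the two concatenated range loops (start..hi then lo..start) by a single modular-indexed pass yielding lo + (offset + i) % n for i in range(n).
import Mathlib
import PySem

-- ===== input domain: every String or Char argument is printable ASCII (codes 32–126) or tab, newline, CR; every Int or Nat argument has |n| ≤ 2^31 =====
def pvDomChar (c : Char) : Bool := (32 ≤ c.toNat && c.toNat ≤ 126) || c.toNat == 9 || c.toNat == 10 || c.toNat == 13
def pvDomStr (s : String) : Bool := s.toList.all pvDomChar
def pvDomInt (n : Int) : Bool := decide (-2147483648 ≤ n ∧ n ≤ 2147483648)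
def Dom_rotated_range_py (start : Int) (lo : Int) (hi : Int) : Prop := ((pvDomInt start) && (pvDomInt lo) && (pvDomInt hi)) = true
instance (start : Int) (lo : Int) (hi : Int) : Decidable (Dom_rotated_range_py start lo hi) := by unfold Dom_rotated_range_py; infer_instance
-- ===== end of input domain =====

-- B replaces A's two concatenated range loops by one modular-indexed pass (alternative decomposition, same cost).


-- ===== PORT A =====
def rotated_range_py (start : Int) (lo : Int) (hi : Int) : List Int :=
  if lo ≥ hi then []
  else if lo ≤ start ∧ start < hi then
    PySem.List.pyRange start hi 1 ++ PySem.List.pyRange lo start 1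
  else
    PySem.List.pyRange lo hi 1

-- ===== PORT B =====
def rotated_range_py_alt (start : Int) (lo : Int) (hi : Int) : List Int :=
  let n := hi - lo
  if n ≤ 0 then []
  else
    let offset := if lo ≤ start ∧ start < hi then start - lo else 0
    (PySem.List.pyRange 0 n 1).map (fun i => lo + PySem.Int.mod (offset + i) n)

-- ===== PRECONDITION & SPEC =====
def Spec_rotated_range_py (start : Int) (lo : Int) (hi : Int) (out : List Int) : Prop := out = rotated_range_py_alt start lo hi
instance (start : Int) (lo : Int) (hi : Int) (out : List Int) : Decidable (Spec_rotated_range_py start lo hi out) := by unfold Spec_rotated_range_py; infer_instance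

-- ===== CLAIM (what is proved, stated in full; the proofs are below) =====
def Claim_equal_rotated_range_py : Prop := ∀ (start : Int) (lo : Int) (hi : Int), Dom_rotated_range_py start lo hi → Spec_rotated_range_py start lo hi (rotated_range_py start lo hi)

-- ===== LEMMAS AND PROOFS =====
theorem pv_fmod_of_pos (a b : Int) (h : 0 < b) : a.fmod b = a % b := by
  rw [Int.fmod_eq_emod, if_pos (Or.inl (le_of_lt h))]; ring

theorem pv_emod_low (x n : Int) (h0 : 0 ≤ x) (h1 : x < n) : x % n = x :=
  Int.emod_eq_of_lt h0 h1

theorem pv_emod_high (x n : Int) (h0 : n ≤ x) (h1 : x < 2 * n) : x % n = x - n :=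
  calc x % n = (x - n) % n := (Int.sub_emod_right x n).symm
    _ = x - n := Int.emod_eq_of_lt (by omega) (by omega)

-- ===== VERDICT (by name: the statement is the Claim_ definition above) =====
theorem rotated_range_py_spec : Claim_equal_rotated_range_py := by
  intro start lo hi _
  unfold Spec_rotated_range_py rotated_range_py rotated_range_py_alt
  by_cases hge : lo ≥ hi
  · rw [if_pos hge, if_pos (by omega : hi - lo ≤ 0)]
  · rw [if_neg hge, if_neg (by omega : ¬ hi - lo ≤ 0)]
    by_cases hin : lo ≤ start ∧ start < hi
    · rw [if_pos hin, if_pos hin]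
      apply List.ext_getElem
      · simp only [List.length_append, List.length_map, PySem.List.length_pyRange_one]
        omega
      · intro k h1 h2
        rw [List.getElem_append]
        by_cases hk : k < (PySem.List.pyRange start hi 1).length
        · rw [dif_pos hk]
          rw [List.getElem_map, PySem.List.getElem_pyRange_one, PySem.List.getElem_pyRange_one]
          simp only [PySem.Int.mod]
          rw [pv_fmod_of_pos _ _ (by omega)]
          simp only [PySem.List.length_pyRange_one] at hk
          rw [pv_emod_low _ _ (by omega) (by omega)]
          omega
        · rw [dif_neg hk]
          rw [List.getElem_map, PySem.List.getElem_pyRange_one, PySem.List.getElem_pyRange_one]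
          simp only [PySem.Int.mod]
          rw [pv_fmod_of_pos _ _ (by omega)]
          simp only [List.length_append, List.length_map,
            PySem.List.length_pyRange_one] at hk h1 h2
          rw [pv_emod_high _ _ (by omega) (by omega)]
          simp only [PySem.List.length_pyRange_one]
          omega
    · rw [if_neg hin, if_neg hin]
      apply List.ext_getElem
      · simp only [List.length_map, PySem.List.length_pyRange_one]
        omega
      · intro k h1 h2
        rw [List.getElem_map, PySem.List.getElem_pyRange_one, PySem.List.getElem_pyRange_one]
        simp only [PySem.Int.mod]
        rw [pv_fmod_of_pos _ _ (by omega)]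
        simp only [PySem.List.length_pyRange_one] at h1
        rw [pv_emod_low _ _ (by omega) (by omega)]
        omega
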